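-- pv_equiv track=rewrite | github.com/Captain-Vikram/AI_LMS | Backend/routes/classroom_routes.py | _resource_counts
-- ===== SOURCE A (Python) =====
-- from typing import Any, Dict, List, Optional, Tuple
--
-- def _resource_counts(resources: List[Dict[str, Any]]) -> Dict[str, int]:
--     approved = sum(1 for resource in resources if resource.get("approval_status") == "approved")
--     rejected = sum(1 for resource in resources if resource.get("approval_status") == "rejected")
--     pending = max(0, len(resources) - approved - rejected)
--     return {
--         "total": len(resources),
--         "approved": approved,
--         "pending": pending,
--         "rejected": rejected,
--     }
-- ===== SOURCE B (Python) =====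
-- def _resource_counts(resources):
--     approved = rejected = pending = 0
--     for resource in resources:
--         status = resource.get("approval_status")
--         if status == "approved":
--             approved += 1
--         elif status == "rejected":
--             rejected += 1
--         else:
--             pending += 1
--     return {
--         "total": approved + pending + rejected,
--         "approved": approved,
--         "pending": pending,
--         "rejected": rejected,
--     }
-- ===== Notes on version B (the rewrite author's own statement) =====
-- stated objective: simpler
-- what changed: Replaces three separate passes (two filtering sums plus a len/remainder computation with max) by one loop maintaining approved/rejected/pending counters, deriving total as their sum.
import Mathlib
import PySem

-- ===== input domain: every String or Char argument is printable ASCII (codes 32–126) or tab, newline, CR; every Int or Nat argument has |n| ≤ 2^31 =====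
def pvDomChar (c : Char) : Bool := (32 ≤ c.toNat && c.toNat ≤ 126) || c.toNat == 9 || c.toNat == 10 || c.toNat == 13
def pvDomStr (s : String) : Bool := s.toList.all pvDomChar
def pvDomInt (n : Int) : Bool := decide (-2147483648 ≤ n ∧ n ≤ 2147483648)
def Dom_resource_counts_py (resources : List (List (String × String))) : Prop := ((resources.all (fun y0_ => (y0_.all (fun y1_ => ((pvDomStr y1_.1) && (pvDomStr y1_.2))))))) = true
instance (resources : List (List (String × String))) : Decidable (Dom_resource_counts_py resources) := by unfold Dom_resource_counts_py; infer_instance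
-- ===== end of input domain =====

-- B replaces A's three passes (two filtered sums and a remainder with max) by one loop keeping
-- approved/rejected/pending counters; objective: simpler.


-- ===== PORT A =====
-- resource.get("approval_status"): first-match lookup in the association list (dict convention)
def rcGetStatus (resource : List (String × String)) : Option String :=
  (resource.find? (fun p => p.1 == "approval_status")).map (·.2)

def resource_counts_py (resources : List (List (String × String))) : List (String × Int) :=
  let approved : Int := resources.foldl
    (fun acc resource => if rcGetStatus resource == some "approved" then acc + 1 else acc) 0
  let rejected : Int := resources.foldl
    (fun acc resource => if rcGetStatus resource == some "rejected" then acc + 1 else acc) 0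
  let pending : Int := max 0 ((resources.length : Int) - approved - rejected)
  [("total", (resources.length : Int)), ("approved", approved),
   ("pending", pending), ("rejected", rejected)]

-- ===== PORT B =====
def resource_counts_py_alt (resources : List (List (String × String))) : List (String × Int) :=
  let c : Int × Int × Int := resources.foldl
    (fun acc resource =>
      let status := rcGetStatus resource
      if status == some "approved" then (acc.1 + 1, acc.2.1, acc.2.2)
      else if status == some "rejected" then (acc.1, acc.2.1 + 1, acc.2.2)
      else (acc.1, acc.2.1, acc.2.2 + 1))
    (0, 0, 0)
  [("total", c.1 + c.2.2 + c.2.1), ("approved", c.1),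
   ("pending", c.2.2), ("rejected", c.2.1)]

-- ===== PRECONDITION & SPEC =====
def Spec_resource_counts_py (resources : List (List (String × String))) (out : List (String × Int)) : Prop := out = resource_counts_py_alt resources
instance (resources : List (List (String × String))) (out : List (String × Int)) : Decidable (Spec_resource_counts_py resources out) := by unfold Spec_resource_counts_py; infer_instance

-- ===== CLAIM (what is proved, stated in full; the proofs are below) =====
def Claim_equal_resource_counts_py : Prop := ∀ (resources : List (List (String × String))), Dom_resource_counts_py resources → Spec_resource_counts_py resources (resource_counts_py resources)

-- ===== LEMMAS AND PROOFS =====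

-- generic: A's counting foldl, with the accumulator hoisted out
theorem rc_foldl_count_shift (P : List (String × String) → Bool) :
    ∀ (l : List (List (String × String))) (a : Int),
      l.foldl (fun acc r => if P r then acc + 1 else acc) a
        = a + l.foldl (fun acc r => if P r then acc + 1 else acc) 0 := by
  intro l
  induction l with
  | nil => intro a; simp
  | cons x t ih =>
    intro a
    simp only [List.foldl_cons]
    rw [ih (if P x then a + 1 else a), ih (if P x then (0:Int) + 1 else 0)]
    split_ifs <;> ring

-- B's loop computes A's two counts and the number of remaining elements
theorem rc_loop_eq :
    ∀ (l : List (List (String × String))) (a r p : Int),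
      l.foldl
        (fun acc resource =>
          let status := rcGetStatus resource
          if status == some "approved" then (acc.1 + 1, acc.2.1, acc.2.2)
          else if status == some "rejected" then (acc.1, acc.2.1 + 1, acc.2.2)
          else (acc.1, acc.2.1, acc.2.2 + 1))
        (a, r, p)
      = (a + l.foldl (fun acc rs => if rcGetStatus rs == some "approved" then acc + 1 else acc) 0,
         r + l.foldl (fun acc rs => if rcGetStatus rs == some "rejected" then acc + 1 else acc) 0,
         p + ((l.length : Int)
              - l.foldl (fun acc rs => if rcGetStatus rs == some "approved" then acc + 1 else acc) 0
              - l.foldl (fun acc rs => if rcGetStatus rs == some "rejected" then acc + 1 else acc) 0)) := by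
  intro l
  induction l with
  | nil => intro a r p; simp
  | cons x t ih =>
    intro a r p
    simp only [List.foldl_cons]
    rw [rc_foldl_count_shift (fun rs => rcGetStatus rs == some "approved") t,
        rc_foldl_count_shift (fun rs => rcGetStatus rs == some "rejected") t]
    by_cases h1 : rcGetStatus x == some "approved"
    · have h2 : (rcGetStatus x == some "rejected") = false := by
        simp only [beq_iff_eq] at h1 ⊢; rw [h1]; simp
      simp only [h1, h2, if_true, ih, List.length_cons, Prod.mk.injEq]
      refine ⟨by push_cast; ring, by push_cast; ring, by push_cast; ring⟩
    · by_cases h2 : rcGetStatus x == some "rejected" <;>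
        simp only [h1, h2, if_true, ih, List.length_cons, Prod.mk.injEq] <;>
        refine ⟨by push_cast; ring, by push_cast; ring, by push_cast; ring⟩

-- the remainder is nonnegative, so A's max 0 is the identity
theorem rc_counts_le :
    ∀ (l : List (List (String × String))),
      l.foldl (fun acc rs => if rcGetStatus rs == some "approved" then acc + 1 else acc) 0
      + l.foldl (fun acc rs => if rcGetStatus rs == some "rejected" then acc + 1 else acc) 0
      ≤ (l.length : Int) := by
  intro l
  induction l with
  | nil => simp
  | cons x t ih =>
    simp only [List.foldl_cons, List.length_cons]
    rw [rc_foldl_count_shift (fun rs => rcGetStatus rs == some "approved") t,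
        rc_foldl_count_shift (fun rs => rcGetStatus rs == some "rejected") t]
    by_cases h1 : rcGetStatus x == some "approved"
    · have h2 : (rcGetStatus x == some "rejected") = false := by
        simp only [beq_iff_eq] at h1 ⊢; rw [h1]; simp
      simp only [h1, h2, if_true]
      push_cast at ih ⊢; omega
    · by_cases h2 : rcGetStatus x == some "rejected" <;>
        simp only [h1, h2, if_true] <;> push_cast at ih ⊢ <;> omega

-- ===== VERDICT (by name: the statement is the Claim_ definition above) =====
theorem resource_counts_py_spec : Claim_equal_resource_counts_py := by
  intro resources _
  unfold Spec_resource_counts_py resource_counts_py resource_counts_py_alt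
  rw [rc_loop_eq resources 0 0 0]
  have h := rc_counts_le resources
  simp only [List.cons.injEq, Prod.mk.injEq, and_true, true_and]
  refine ⟨by omega, by omega, by omega⟩
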